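-- pv_equiv track=rewrite | github.com/regulartim/aoc24 | 20_race_condition/race_condition.py | build_dist_map
-- ===== SOURCE A (Python) =====
-- from collections import deque
--
-- DIRECTIONS = [(1, 0), (0, 1), (-1, 0), (0, -1)]
--
-- def add_tuples(a: tuple, b: tuple) -> tuple:
--     return tuple(map(sum, zip(a, b)))
--
-- def neighbours(state: tuple):
--     for d in DIRECTIONS:
--         yield add_tuples(state, d)
--
-- def build_dist_map(ref_point: tuple, track: set) -> dict:
--     result = {}
--     q = deque([(ref_point, 0)])
--     while q:
--         p, dist = q.popleft()
--         if p in result: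
--             continue
--         result[p] = dist
--         for n in neighbours(p):
--             if n not in track:
--                 continue
--             q.append((n, dist + 1))
--     return result
-- ===== SOURCE B (Python) =====
-- DIRECTIONS = [(1, 0), (0, 1), (-1, 0), (0, -1)]
--
-- def build_dist_map(ref_point: tuple, track: set) -> dict:
--     result = {}
--     frontier = [ref_point]
--     dist = 0
--     while frontier:
--         for p in frontier:
--             result[p] = dist
--         nxt = []
--         for p in frontier:
--             for d in DIRECTIONS:
--                 n = (p[0] + d[0], p[1] + d[1])
--                 if n in track and n not in result and n not in nxt:
--                     nxt.append(n)
--         frontier = nxt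
--         dist += 1
--     return result
-- ===== Notes on version B (the rewrite author's own statement) =====
-- stated objective: alternative
-- what changed: Replaces the deque of (point, dist) tuples popped one at a time (with visited-check at pop time) by a level-synchronous BFS: the distance is an outer loop counter, each whole frontier is recorded at once, and deduplication/visited filtering happens while building the next frontier list.
import Mathlib
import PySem

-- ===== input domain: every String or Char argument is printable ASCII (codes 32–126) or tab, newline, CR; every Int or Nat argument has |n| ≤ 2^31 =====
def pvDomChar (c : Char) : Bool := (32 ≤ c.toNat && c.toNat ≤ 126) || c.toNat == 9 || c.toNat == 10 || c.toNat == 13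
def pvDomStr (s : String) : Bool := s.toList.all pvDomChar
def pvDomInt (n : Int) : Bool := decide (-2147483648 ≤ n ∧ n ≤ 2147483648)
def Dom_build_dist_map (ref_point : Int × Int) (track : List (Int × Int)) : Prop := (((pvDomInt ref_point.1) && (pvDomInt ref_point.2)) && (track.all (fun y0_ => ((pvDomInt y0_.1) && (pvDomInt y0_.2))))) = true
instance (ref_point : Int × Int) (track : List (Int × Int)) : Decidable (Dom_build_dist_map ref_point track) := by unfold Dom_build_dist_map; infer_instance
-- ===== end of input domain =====

-- B replaces A's deque-of-(point, dist) BFS by a level-synchronous BFS (distance is an outer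
-- counter, dedup happens while the next frontier is built); same return value, objective: alternative.

-- ===== PORT A =====
-- DIRECTIONS
def pvDirections : List (Int × Int) := [(1, 0), (0, 1), (-1, 0), (0, -1)]

-- add_tuples (exact for the 2-tuples it is used on here)
def pvAddTuples (a b : Int × Int) : Int × Int := (a.1 + b.1, a.2 + b.2)

-- neighbours
def pvNeighbours (p : Int × Int) : List (Int × Int) := pvDirections.map (fun d => pvAddTuples p d)

-- `p in result` for the result dict (keyed on the point, value ignored)
def pvHasKey (res : List (Int × Int × Int)) (p : Int × Int) : Bool :=
  res.any (fun e => e.1 == p.1 && e.2.1 == p.2)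

-- termination measure for both loops: allowed points not yet recorded
def pvMeasure (allowed : List (Int × Int)) (res : List (Int × Int × Int)) : Nat :=
  (allowed.toFinset.filter (fun x => pvHasKey res x = false)).card

theorem pvMeasure_append_le (allowed : List (Int × Int)) (res l : List (Int × Int × Int)) :
    pvMeasure allowed (res ++ l) ≤ pvMeasure allowed res := by
  apply Finset.card_le_card
  intro x hx
  simp only [Finset.mem_filter, pvHasKey, List.any_append, Bool.or_eq_false_iff] at *
  exact ⟨hx.1, hx.2.1⟩

theorem pvMeasure_lt (allowed : List (Int × Int)) (res : List (Int × Int × Int))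
    (p : Int × Int) (d : Int) (hp : p ∈ allowed) (hk : pvHasKey res p = false) :
    pvMeasure allowed (res ++ [(p.1, p.2, d)]) < pvMeasure allowed res := by
  apply Finset.card_lt_card
  rw [Finset.ssubset_iff_of_subset]
  · exact ⟨p, by simp [Finset.mem_filter, List.mem_toFinset.2 hp, hk], by simp [Finset.mem_filter, pvHasKey]⟩
  · intro x hx
    simp only [Finset.mem_filter, pvHasKey, List.any_append, Bool.or_eq_false_iff] at *
    exact ⟨hx.1, hx.2.1⟩

-- A's while-loop over the deque `q`; the hypothesis arguments hsub/hq carry no data, they only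
-- justify termination.  `result[p] = dist` is `res ++ [(p.1, p.2, dist)]`, exact because the
-- branch guarantees the key is fresh (a Python dict appends a fresh key at the end).
def pvLoopA (allowed track : List (Int × Int)) (q : List ((Int × Int) × Int))
    (res : List (Int × Int × Int))
    (hsub : ∀ x ∈ track, x ∈ allowed) (hq : ∀ e ∈ q, e.1 ∈ allowed) :
    List (Int × Int × Int) :=
  match q, hq with
  | [], _ => res
  | (p, dist) :: rest, hq =>
    if h : pvHasKey res p then
      pvLoopA allowed track rest res hsub (fun e he => hq e (List.mem_cons_of_mem _ he))
    else
      pvLoopA allowed track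
        (rest ++ ((pvNeighbours p).filter (fun n => track.contains n)).map (fun n => (n, dist + 1)))
        (res ++ [(p.1, p.2, dist)]) hsub
        (by
          intro e he
          rcases List.mem_append.1 he with h1 | h2
          · exact hq e (List.mem_cons_of_mem _ h1)
          · rcases List.mem_map.1 h2 with ⟨n, hn, rfl⟩
            exact hsub n (by simpa using (List.of_mem_filter hn)))
  termination_by (pvMeasure allowed res, q.length)
  decreasing_by
  · exact Prod.Lex.right _ (by simp)
  · exact Prod.Lex.left _ _
      (pvMeasure_lt allowed res p dist (hq (p, dist) (List.mem_cons_self)) (by simpa using h))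

def build_dist_map (ref_point : Int × Int) (track : List (Int × Int)) : List (Int × Int × Int) :=
  pvLoopA (ref_point :: track) track [(ref_point, 0)] []
    (fun x hx => List.mem_cons_of_mem _ hx)
    (by intro e he; rw [List.mem_singleton] at he; subst he; exact List.mem_cons_self)

-- ===== PORT B =====
-- B's two per-level loops: record the frontier, then build the deduplicated next frontier
def pvRecordLevel (dist : Int) (res : List (Int × Int × Int)) (frontier : List (Int × Int)) :
    List (Int × Int × Int) :=
  frontier.foldl (fun r p => r ++ [(p.1, p.2, dist)]) res

def pvNextFrontier (track : List (Int × Int)) (res' : List (Int × Int × Int))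
    (frontier : List (Int × Int)) : List (Int × Int) :=
  frontier.foldl (fun acc p =>
    pvDirections.foldl (fun acc' d =>
      if track.contains (p.1 + d.1, p.2 + d.2) && !pvHasKey res' (p.1 + d.1, p.2 + d.2)
          && !acc'.contains (p.1 + d.1, p.2 + d.2)
      then acc' ++ [(p.1 + d.1, p.2 + d.2)] else acc') acc) []

-- invariant of B's inner frontier-building loop (cited by pvLoopB for its recursive call)
theorem pvInnerInv (track : List (Int × Int)) (res' : List (Int × Int × Int)) (p : Int × Int) :
    ∀ (dirs : List (Int × Int)) (acc : List (Int × Int)), acc.Nodup →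
    (∀ n ∈ acc, n ∈ track ∧ pvHasKey res' n = false) →
    (dirs.foldl (fun acc' d =>
        if track.contains (p.1 + d.1, p.2 + d.2) && !pvHasKey res' (p.1 + d.1, p.2 + d.2)
            && !acc'.contains (p.1 + d.1, p.2 + d.2)
        then acc' ++ [(p.1 + d.1, p.2 + d.2)] else acc') acc).Nodup ∧
    ∀ n ∈ dirs.foldl (fun acc' d =>
        if track.contains (p.1 + d.1, p.2 + d.2) && !pvHasKey res' (p.1 + d.1, p.2 + d.2)
            && !acc'.contains (p.1 + d.1, p.2 + d.2)
        then acc' ++ [(p.1 + d.1, p.2 + d.2)] else acc') acc,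
      n ∈ track ∧ pvHasKey res' n = false := by
  intro dirs
  induction dirs with
  | nil => intro acc h1 h2; exact ⟨h1, h2⟩
  | cons dd ds ih =>
    intro acc h1 h2
    simp only [List.foldl_cons]
    by_cases hc : (track.contains (p.1 + dd.1, p.2 + dd.2)
        && !pvHasKey res' (p.1 + dd.1, p.2 + dd.2)
        && !acc.contains (p.1 + dd.1, p.2 + dd.2)) = true
    · rw [if_pos hc]
      simp only [Bool.and_eq_true, Bool.not_eq_true'] at hc
      have hnm : (p.1 + dd.1, p.2 + dd.2) ∉ acc := by
        intro hmem
        have hh := List.contains_iff_mem.2 hmem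
        rw [hc.2] at hh
        exact Bool.false_ne_true hh
      apply ih
      · rw [List.nodup_append]
        refine ⟨h1, List.nodup_singleton _, ?_⟩
        intro x hx y hy
        rw [List.mem_singleton] at hy
        subst hy
        exact fun he => hnm (he ▸ hx)
      · intro n hn
        rcases List.mem_append.1 hn with h | h
        · exact h2 n h
        · rw [List.mem_singleton] at h; subst h
          exact ⟨List.contains_iff_mem.1 hc.1.1, hc.1.2⟩
    · rw [if_neg hc]; exact ih acc h1 h2

theorem pvOuterInv (track : List (Int × Int)) (res' : List (Int × Int × Int)) :
    ∀ (F : List (Int × Int)) (acc : List (Int × Int)), acc.Nodup →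
    (∀ n ∈ acc, n ∈ track ∧ pvHasKey res' n = false) →
    (F.foldl (fun acc p =>
        pvDirections.foldl (fun acc' d =>
          if track.contains (p.1 + d.1, p.2 + d.2) && !pvHasKey res' (p.1 + d.1, p.2 + d.2)
              && !acc'.contains (p.1 + d.1, p.2 + d.2)
          then acc' ++ [(p.1 + d.1, p.2 + d.2)] else acc') acc) acc).Nodup ∧
    ∀ n ∈ F.foldl (fun acc p =>
        pvDirections.foldl (fun acc' d =>
          if track.contains (p.1 + d.1, p.2 + d.2) && !pvHasKey res' (p.1 + d.1, p.2 + d.2)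
              && !acc'.contains (p.1 + d.1, p.2 + d.2)
          then acc' ++ [(p.1 + d.1, p.2 + d.2)] else acc') acc) acc,
      n ∈ track ∧ pvHasKey res' n = false := by
  intro F
  induction F with
  | nil => intro acc h1 h2; exact ⟨h1, h2⟩
  | cons p fs ih =>
    intro acc h1 h2
    simp only [List.foldl_cons]
    obtain ⟨g1, g2⟩ := pvInnerInv track res' p pvDirections acc h1 h2
    exact ih _ g1 g2

-- B's while-loop: record the whole frontier at the current distance, then build the next
-- frontier with duplicate/visited filtering; hsub/hf are proof-only termination arguments.
def pvLoopB (allowed track : List (Int × Int)) (frontier : List (Int × Int))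
    (res : List (Int × Int × Int)) (dist : Int)
    (hsub : ∀ x ∈ track, x ∈ allowed)
    (hf : frontier.Nodup ∧ ∀ p ∈ frontier, p ∈ allowed ∧ pvHasKey res p = false) :
    List (Int × Int × Int) :=
  if hemp : frontier = [] then res
  else
    let res' := pvRecordLevel dist res frontier
    let nxt := pvNextFrontier track res' frontier
    pvLoopB allowed track nxt res' (dist + 1) hsub
      (by
        obtain ⟨g1, g2⟩ := pvOuterInv track (pvRecordLevel dist res frontier) frontier []
          List.nodup_nil (by simp)
        exact ⟨g1, fun n hn => ⟨hsub n (g2 n hn).1, (g2 n hn).2⟩⟩)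
  termination_by pvMeasure allowed res
  decreasing_by
    obtain ⟨p0, ps, hfr⟩ := List.exists_cons_of_ne_nil hemp
    subst hfr
    unfold pvRecordLevel
    rw [PySem.List.foldl_append_singleton_eq_map (fun (p : Int × Int) => (p.1, p.2, dist))]
    rw [List.map_cons, List.append_cons]
    exact lt_of_le_of_lt (pvMeasure_append_le allowed _ _)
      (pvMeasure_lt allowed res p0 dist (hf.2 p0 (List.mem_cons_self)).1
        (hf.2 p0 (List.mem_cons_self)).2)

def build_dist_map_alt (ref_point : Int × Int) (track : List (Int × Int)) : List (Int × Int × Int) :=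
  pvLoopB (ref_point :: track) track [ref_point] [] 0
    (fun x hx => List.mem_cons_of_mem _ hx)
    (by
      refine ⟨List.nodup_singleton _, ?_⟩
      intro p hp; rw [List.mem_singleton] at hp; subst hp
      exact ⟨List.mem_cons_self, rfl⟩)

-- ===== PRECONDITION & SPEC =====
def Spec_build_dist_map (ref_point : Int × Int) (track : List (Int × Int)) (out : List (Int × Int × Int)) : Prop := out = build_dist_map_alt ref_point track
instance (ref_point : Int × Int) (track : List (Int × Int)) (out : List (Int × Int × Int)) : Decidable (Spec_build_dist_map ref_point track out) := by unfold Spec_build_dist_map; infer_instance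

-- ===== CLAIM (what is proved, stated in full; the proofs are below) =====
def Claim_equal_build_dist_map : Prop := ∀ (ref_point : Int × Int) (track : List (Int × Int)), Dom_build_dist_map ref_point track → Spec_build_dist_map ref_point track (build_dist_map ref_point track)

-- ===== LEMMAS AND PROOFS =====

-- the in-track neighbours of p, in DIRECTIONS order
def pvNbrsT (track : List (Int × Int)) (p : Int × Int) : List (Int × Int) :=
  (pvNeighbours p).filter (fun n => track.contains n)

-- pop-time deduplication: the sublist of `L` that A's loop actually records when the points of
-- `L` are popped in order at distance `d` starting from dict `res`
def pvKeep (d : Int) (res : List (Int × Int × Int)) : List (Int × Int) → List (Int × Int)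
  | [] => []
  | p :: fs =>
    if pvHasKey res p then pvKeep d res fs
    else p :: pvKeep d (res ++ [(p.1, p.2, d)]) fs

theorem pvHasKey_append (res l : List (Int × Int × Int)) (x : Int × Int) :
    pvHasKey (res ++ l) x = (pvHasKey res x || pvHasKey l x) := by
  simp [pvHasKey]

theorem pvHasKey_self (res : List (Int × Int × Int)) (p : Int × Int) (d : Int) :
    pvHasKey (res ++ [(p.1, p.2, d)]) p = true := by
  simp [pvHasKey]

theorem pvHasKey_entries (acc : List (Int × Int)) (d : Int) (x : Int × Int) :
    pvHasKey (acc.map (fun p => (p.1, p.2, d))) x = true ↔ x ∈ acc := by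
  simp only [pvHasKey, List.any_eq_true, List.mem_map, Bool.and_eq_true, beq_iff_eq]
  constructor
  · rintro ⟨e, ⟨p, hp, rfl⟩, h1, h2⟩
    obtain ⟨p1, p2⟩ := p; obtain ⟨x1, x2⟩ := x
    simp only at h1 h2
    subst h1; subst h2; exact hp
  · intro h; exact ⟨(x.1, x.2, d), ⟨x, h, rfl⟩, rfl, rfl⟩

theorem pvKeep_cons_skip {res : List (Int × Int × Int)} {p : Int × Int} (d : Int)
    (fs : List (Int × Int)) (hk : pvHasKey res p = true) :
    pvKeep d res (p :: fs) = pvKeep d res fs := by simp [pvKeep, hk]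

theorem pvKeep_cons_keep {res : List (Int × Int × Int)} {p : Int × Int} (d : Int)
    (fs : List (Int × Int)) (hk : pvHasKey res p = false) :
    pvKeep d res (p :: fs) = p :: pvKeep d (res ++ [(p.1, p.2, d)]) fs := by simp [pvKeep, hk]

theorem pvKeep_props (d : Int) :
    ∀ (L : List (Int × Int)) (res : List (Int × Int × Int)),
    (pvKeep d res L).Nodup ∧ ∀ n ∈ pvKeep d res L, n ∈ L ∧ pvHasKey res n = false := by
  intro L
  induction L with
  | nil => intro res; simp [pvKeep]
  | cons p fs ih =>
    intro res
    by_cases hk : pvHasKey res p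
    · rw [pvKeep_cons_skip d fs hk]
      obtain ⟨h1, h2⟩ := ih res
      exact ⟨h1, fun n hn => ⟨List.mem_cons_of_mem _ (h2 n hn).1, (h2 n hn).2⟩⟩
    · have hk' : pvHasKey res p = false := by simpa using hk
      rw [pvKeep_cons_keep d fs hk']
      obtain ⟨h1, h2⟩ := ih (res ++ [(p.1, p.2, d)])
      constructor
      · rw [List.nodup_cons]
        refine ⟨?_, h1⟩
        intro hmem
        have h3 := (h2 p hmem).2
        rw [pvHasKey_self] at h3
        exact absurd h3 (by simp)
      · intro n hn
        rcases List.mem_cons.1 hn with h | h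
        · subst h; exact ⟨List.mem_cons_self, hk'⟩
        · obtain ⟨hm, hkk⟩ := h2 n h
          rw [pvHasKey_append, Bool.or_eq_false_iff] at hkk
          exact ⟨List.mem_cons_of_mem _ hm, hkk.1⟩

theorem pvKeep_split (d : Int) :
    ∀ (L1 L2 : List (Int × Int)) (res : List (Int × Int × Int)),
    pvKeep d res (L1 ++ L2)
      = pvKeep d res L1 ++ pvKeep d (res ++ (pvKeep d res L1).map (fun p => (p.1, p.2, d))) L2 := by
  intro L1
  induction L1 with
  | nil => intro L2 res; simp [pvKeep]
  | cons p l1 ih =>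
    intro L2 res
    by_cases hk : pvHasKey res p
    · rw [List.cons_append, pvKeep_cons_skip d _ hk, pvKeep_cons_skip d _ hk, ih]
    · have hk' : pvHasKey res p = false := by simpa using hk
      rw [List.cons_append, pvKeep_cons_keep d _ hk', pvKeep_cons_keep d _ hk', ih]
      simp [List.append_assoc]

-- B's next-frontier double fold, characterised through pvKeep
theorem pvFoldInner (track : List (Int × Int)) (res' : List (Int × Int × Int)) (d : Int)
    (p : Int × Int) :
    ∀ (dirs : List (Int × Int)) (acc : List (Int × Int)),
    dirs.foldl (fun acc' dd =>
        if track.contains (p.1 + dd.1, p.2 + dd.2) && !pvHasKey res' (p.1 + dd.1, p.2 + dd.2)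
            && !acc'.contains (p.1 + dd.1, p.2 + dd.2)
        then acc' ++ [(p.1 + dd.1, p.2 + dd.2)] else acc') acc
      = acc ++ pvKeep d (res' ++ acc.map (fun q => (q.1, q.2, d)))
          ((dirs.map (fun dd => pvAddTuples p dd)).filter (fun n => track.contains n)) := by
  intro dirs
  induction dirs with
  | nil => intro acc; simp [pvKeep]
  | cons dd ds ih =>
    intro acc
    have hpa : pvAddTuples p dd = (p.1 + dd.1, p.2 + dd.2) := rfl
    simp only [List.foldl_cons, List.map_cons, List.filter_cons, hpa]
    by_cases ht : track.contains (p.1 + dd.1, p.2 + dd.2) = true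
    · rw [if_pos ht]
      by_cases hv : pvHasKey (res' ++ acc.map (fun q => (q.1, q.2, d))) (p.1 + dd.1, p.2 + dd.2) = true
      · have hcond : (track.contains (p.1 + dd.1, p.2 + dd.2)
            && !pvHasKey res' (p.1 + dd.1, p.2 + dd.2)
            && !acc.contains (p.1 + dd.1, p.2 + dd.2)) = false := by
          have hv2 := hv
          rw [pvHasKey_append, Bool.or_eq_true] at hv2
          rcases hv2 with h | h
          · simp only [h, Bool.not_true, Bool.and_false, Bool.false_and]
          · simp only [List.contains_iff_mem.2 ((pvHasKey_entries acc d _).1 h),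
              Bool.not_true, Bool.and_false]
        rw [if_neg (by simp only [hcond]; exact Bool.false_ne_true)]
        rw [ih acc, pvKeep_cons_skip d _ hv]
      · have hvf : pvHasKey (res' ++ acc.map (fun q => (q.1, q.2, d))) (p.1 + dd.1, p.2 + dd.2) = false := by
          simpa using hv
        have hvf2 := hvf
        rw [pvHasKey_append, Bool.or_eq_false_iff] at hvf2
        have hnacc : acc.contains (p.1 + dd.1, p.2 + dd.2) = false := by
          cases hcac : acc.contains (p.1 + dd.1, p.2 + dd.2)
          · rfl
          · exfalso
            have hmem := List.contains_iff_mem.1 hcac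
            have := (pvHasKey_entries acc d (p.1 + dd.1, p.2 + dd.2)).2 hmem
            rw [hvf2.2] at this
            exact Bool.false_ne_true this
        rw [if_pos (by simp only [ht, hvf2.1, hnacc, Bool.not_false, Bool.and_true])]
        rw [ih (acc ++ [(p.1 + dd.1, p.2 + dd.2)])]
        rw [pvKeep_cons_keep d _ hvf]
        simp [List.map_append, List.append_assoc]
    · have htf : track.contains (p.1 + dd.1, p.2 + dd.2) = false := by simpa using ht
      have hcond : (track.contains (p.1 + dd.1, p.2 + dd.2)
          && !pvHasKey res' (p.1 + dd.1, p.2 + dd.2)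
          && !acc.contains (p.1 + dd.1, p.2 + dd.2)) = false := by
        simp only [htf, Bool.false_and]
      rw [if_neg ht, if_neg (by simp only [hcond]; exact Bool.false_ne_true)]
      exact ih acc

theorem pvFoldOuter (track : List (Int × Int)) (res' : List (Int × Int × Int)) (d : Int) :
    ∀ (F : List (Int × Int)) (acc : List (Int × Int)),
    F.foldl (fun acc p =>
        pvDirections.foldl (fun acc' dd =>
          if track.contains (p.1 + dd.1, p.2 + dd.2) && !pvHasKey res' (p.1 + dd.1, p.2 + dd.2)
              && !acc'.contains (p.1 + dd.1, p.2 + dd.2)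
          then acc' ++ [(p.1 + dd.1, p.2 + dd.2)] else acc') acc) acc
      = acc ++ pvKeep d (res' ++ acc.map (fun q => (q.1, q.2, d))) (F.flatMap (pvNbrsT track)) := by
  intro F
  induction F with
  | nil => intro acc; simp [pvKeep]
  | cons p fs ih =>
    intro acc
    simp only [List.foldl_cons]
    rw [pvFoldInner track res' d p pvDirections acc]
    have hnt : (pvDirections.map (fun dd => pvAddTuples p dd)).filter (fun n => track.contains n)
        = pvNbrsT track p := by simp [pvNbrsT, pvNeighbours]
    rw [hnt, ih]
    rw [List.flatMap_cons, pvKeep_split d]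
    simp [List.map_append, List.append_assoc]

-- one-step equations and argument congruence for the two loops (the hypothesis arguments are
-- proof-irrelevant)
theorem pvLoopA_nil (allowed track : List (Int × Int)) (res : List (Int × Int × Int))
    (hsub : ∀ x ∈ track, x ∈ allowed) (hq : ∀ e ∈ ([] : List ((Int × Int) × Int)), e.1 ∈ allowed) :
    pvLoopA allowed track [] res hsub hq = res := by
  rw [pvLoopA]

theorem pvLoopA_cons (allowed track : List (Int × Int)) (p : Int × Int) (dist : Int)
    (rest : List ((Int × Int) × Int)) (res : List (Int × Int × Int))
    (hsub : ∀ x ∈ track, x ∈ allowed) (hq : ∀ e ∈ (p, dist) :: rest, e.1 ∈ allowed)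
    (hq1 : ∀ e ∈ rest, e.1 ∈ allowed)
    (hq2 : ∀ e ∈ rest ++ ((pvNeighbours p).filter (fun n => track.contains n)).map (fun n => (n, dist + 1)), e.1 ∈ allowed) :
    pvLoopA allowed track ((p, dist) :: rest) res hsub hq =
      if pvHasKey res p then pvLoopA allowed track rest res hsub hq1
      else pvLoopA allowed track
        (rest ++ ((pvNeighbours p).filter (fun n => track.contains n)).map (fun n => (n, dist + 1)))
        (res ++ [(p.1, p.2, dist)]) hsub hq2 := by
  rw [pvLoopA]
  by_cases h : pvHasKey res p <;> simp [h]

theorem pvLoopA_congr {allowed track : List (Int × Int)} {q q' : List ((Int × Int) × Int)}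
    {res res' : List (Int × Int × Int)} {hsub : ∀ x ∈ track, x ∈ allowed}
    (hq : ∀ e ∈ q, e.1 ∈ allowed) (hq' : ∀ e ∈ q', e.1 ∈ allowed)
    (h1 : q = q') (h2 : res = res') :
    pvLoopA allowed track q res hsub hq = pvLoopA allowed track q' res' hsub hq' := by
  subst h1; subst h2; rfl

theorem pvLoopB_nil (allowed track : List (Int × Int)) (res : List (Int × Int × Int)) (dist : Int)
    (hsub : ∀ x ∈ track, x ∈ allowed)
    (hf : ([] : List (Int × Int)).Nodup ∧ ∀ p ∈ ([] : List (Int × Int)), p ∈ allowed ∧ pvHasKey res p = false) :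
    pvLoopB allowed track [] res dist hsub hf = res := by
  unfold pvLoopB
  simp

theorem pvLoopB_ne (allowed track : List (Int × Int)) (frontier : List (Int × Int))
    (res : List (Int × Int × Int)) (dist : Int) (hsub : ∀ x ∈ track, x ∈ allowed)
    (hf : frontier.Nodup ∧ ∀ p ∈ frontier, p ∈ allowed ∧ pvHasKey res p = false)
    (hne : frontier ≠ [])
    (hf' : (pvNextFrontier track (pvRecordLevel dist res frontier) frontier).Nodup ∧
      ∀ p ∈ pvNextFrontier track (pvRecordLevel dist res frontier) frontier,
        p ∈ allowed ∧ pvHasKey (pvRecordLevel dist res frontier) p = false) :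
    pvLoopB allowed track frontier res dist hsub hf
      = pvLoopB allowed track (pvNextFrontier track (pvRecordLevel dist res frontier) frontier)
          (pvRecordLevel dist res frontier) (dist + 1) hsub hf' := by
  conv_lhs => unfold pvLoopB
  rw [dif_neg hne]

theorem pvLoopB_congr {allowed track : List (Int × Int)} {f f' : List (Int × Int)}
    {res res' : List (Int × Int × Int)} {dist : Int} {hsub : ∀ x ∈ track, x ∈ allowed}
    (hf : f.Nodup ∧ ∀ p ∈ f, p ∈ allowed ∧ pvHasKey res p = false)
    (hf' : f'.Nodup ∧ ∀ p ∈ f', p ∈ allowed ∧ pvHasKey res' p = false)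
    (h1 : f = f') (h2 : res = res') :
    pvLoopB allowed track f res dist hsub hf = pvLoopB allowed track f' res' dist hsub hf' := by
  subst h1; subst h2; rfl

-- small membership helpers
theorem pvQokMap {allowed : List (Int × Int)} {L : List (Int × Int)}
    (h : ∀ p ∈ L, p ∈ allowed) (dd : Int) :
    ∀ e ∈ L.map (fun p => (p, dd)), e.1 ∈ allowed := by
  intro e he; rcases List.mem_map.1 he with ⟨p, hp, rfl⟩; exact h p hp

theorem pvQokApp {allowed : List (Int × Int)} {q1 q2 : List ((Int × Int) × Int)}
    (h1 : ∀ e ∈ q1, e.1 ∈ allowed) (h2 : ∀ e ∈ q2, e.1 ∈ allowed) :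
    ∀ e ∈ q1 ++ q2, e.1 ∈ allowed := by
  intro e he; rcases List.mem_append.1 he with h | h
  exacts [h1 e h, h2 e h]

theorem pvNtSub {allowed track : List (Int × Int)} (hsub : ∀ x ∈ track, x ∈ allowed)
    (p : Int × Int) : ∀ n ∈ pvNbrsT track p, n ∈ allowed := by
  intro n hn
  unfold pvNbrsT at hn
  exact hsub n (List.contains_iff_mem.1 (List.of_mem_filter hn))

theorem pvFlatSub {allowed track : List (Int × Int)} (hsub : ∀ x ∈ track, x ∈ allowed)
    (L : List (Int × Int)) : ∀ n ∈ L.flatMap (pvNbrsT track), n ∈ allowed := by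
  intro n hn
  rcases List.mem_flatMap.1 hn with ⟨p, _, hnp⟩
  exact pvNtSub hsub p n hnp

-- processing one BFS level of A's queue: the points actually recorded are pvKeep, and their
-- in-track neighbours are appended behind the pending next-level entries
theorem pvALevel (allowed track : List (Int × Int)) (hsub : ∀ x ∈ track, x ∈ allowed) (d : Int) :
    ∀ (F pend : List (Int × Int)) (res : List (Int × Int × Int))
      (hF : ∀ p ∈ F, p ∈ allowed) (hpend : ∀ p ∈ pend, p ∈ allowed)
      (hq1 : ∀ e ∈ F.map (fun p => (p, d)) ++ pend.map (fun p => (p, d + 1)), e.1 ∈ allowed)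
      (hq2 : ∀ e ∈ (pend ++ (pvKeep d res F).flatMap (pvNbrsT track)).map (fun p => (p, d + 1)), e.1 ∈ allowed),
    pvLoopA allowed track (F.map (fun p => (p, d)) ++ pend.map (fun p => (p, d + 1))) res hsub hq1
      = pvLoopA allowed track
          ((pend ++ (pvKeep d res F).flatMap (pvNbrsT track)).map (fun p => (p, d + 1)))
          (res ++ (pvKeep d res F).map (fun p => (p.1, p.2, d))) hsub hq2 := by
  intro F
  induction F with
  | nil =>
    intro pend res hF hpend hq1 hq2
    exact pvLoopA_congr hq1 hq2 (by simp [pvKeep]) (by simp [pvKeep])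
  | cons p fs ih =>
    intro pend res hF hpend hq1 hq2
    have hFfs : ∀ x ∈ fs, x ∈ allowed := fun x hx => hF x (List.mem_cons_of_mem _ hx)
    have hp : p ∈ allowed := hF p List.mem_cons_self
    have hrest : ∀ e ∈ fs.map (fun p => (p, d)) ++ pend.map (fun p => (p, d + 1)), e.1 ∈ allowed :=
      pvQokApp (pvQokMap hFfs d) (pvQokMap hpend (d + 1))
    have hqc : ∀ e ∈ (p, d) :: (fs.map (fun p => (p, d)) ++ pend.map (fun p => (p, d + 1))), e.1 ∈ allowed := by
      intro e he
      rcases List.mem_cons.1 he with h | h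
      · subst h; exact hp
      · exact hrest e h
    have hrest2 : ∀ e ∈ (fs.map (fun p => (p, d)) ++ pend.map (fun p => (p, d + 1)))
        ++ ((pvNeighbours p).filter (fun n => track.contains n)).map (fun n => (n, d + 1)), e.1 ∈ allowed := by
      refine pvQokApp hrest ?_
      intro e he
      rcases List.mem_map.1 he with ⟨n, hn, rfl⟩
      exact pvNtSub hsub p n (by simpa [pvNbrsT] using hn)
    rw [pvLoopA_congr hq1 hqc (by simp) rfl]
    rw [pvLoopA_cons allowed track p d _ res hsub hqc hrest hrest2]
    by_cases hk : pvHasKey res p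
    · rw [if_pos hk]
      have hq2' : ∀ e ∈ (pend ++ (pvKeep d res fs).flatMap (pvNbrsT track)).map (fun p => (p, d + 1)), e.1 ∈ allowed :=
        pvQokMap (fun x hx => (List.mem_append.1 hx).elim (hpend x) (fun hxx => pvFlatSub hsub _ x hxx)) (d + 1)
      rw [ih pend res hFfs hpend hrest hq2']
      exact pvLoopA_congr hq2' hq2 (by rw [pvKeep_cons_skip d _ hk]) (by rw [pvKeep_cons_skip d _ hk])
    · have hk' : pvHasKey res p = false := by simpa using hk
      rw [if_neg hk]
      have hpend' : ∀ x ∈ pend ++ pvNbrsT track p, x ∈ allowed :=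
        fun x hx => (List.mem_append.1 hx).elim (hpend x) (pvNtSub hsub p x)
      have hq1' : ∀ e ∈ fs.map (fun p => (p, d)) ++ (pend ++ pvNbrsT track p).map (fun p => (p, d + 1)), e.1 ∈ allowed :=
        pvQokApp (pvQokMap hFfs d) (pvQokMap hpend' (d + 1))
      have hq2' : ∀ e ∈ ((pend ++ pvNbrsT track p)
          ++ (pvKeep d (res ++ [(p.1, p.2, d)]) fs).flatMap (pvNbrsT track)).map (fun p => (p, d + 1)), e.1 ∈ allowed :=
        pvQokMap (fun x hx => (List.mem_append.1 hx).elim (hpend' x) (fun hxx => pvFlatSub hsub _ x hxx)) (d + 1)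
      rw [pvLoopA_congr hrest2 hq1' (by simp [pvNbrsT, List.map_append, List.append_assoc]) rfl]
      rw [ih (pend ++ pvNbrsT track p) (res ++ [(p.1, p.2, d)]) hFfs hpend' hq1' hq2']
      exact pvLoopA_congr hq2' hq2
        (by rw [pvKeep_cons_keep d _ hk']; simp [List.flatMap_cons, List.append_assoc])
        (by rw [pvKeep_cons_keep d _ hk']; simp [List.map_cons, List.append_assoc])

-- when nothing of `pend` is new, A skips the whole level and B stops
theorem pvEmptyKeep (allowed track : List (Int × Int)) (hsub : ∀ x ∈ track, x ∈ allowed)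
    (pend : List (Int × Int)) (res : List (Int × Int × Int)) (d : Int)
    (hpend : ∀ p ∈ pend, p ∈ allowed)
    (hq : ∀ e ∈ pend.map (fun p => (p, d)), e.1 ∈ allowed)
    (hB : (pvKeep d res pend).Nodup ∧ ∀ p ∈ pvKeep d res pend, p ∈ allowed ∧ pvHasKey res p = false)
    (hK : pvKeep d res pend = []) :
    pvLoopA allowed track (pend.map (fun p => (p, d))) res hsub hq
      = pvLoopB allowed track (pvKeep d res pend) res d hsub hB := by
  have hq1 : ∀ e ∈ pend.map (fun p => (p, d)) ++ ([] : List (Int × Int)).map (fun p => (p, d + 1)), e.1 ∈ allowed := by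
    simpa using hq
  have hq2 : ∀ e ∈ (([] : List (Int × Int)) ++ (pvKeep d res pend).flatMap (pvNbrsT track)).map (fun p => (p, d + 1)), e.1 ∈ allowed :=
    pvQokMap (fun x hx => pvFlatSub hsub _ x (by simpa using hx)) (d + 1)
  have hq3 : ∀ e ∈ ([] : List ((Int × Int) × Int)), e.1 ∈ allowed := by simp
  have hBnil : ([] : List (Int × Int)).Nodup ∧ ∀ p ∈ ([] : List (Int × Int)), p ∈ allowed ∧ pvHasKey res p = false := by simp
  calc
    pvLoopA allowed track (pend.map (fun p => (p, d))) res hsub hq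
        = pvLoopA allowed track (pend.map (fun p => (p, d)) ++ ([] : List (Int × Int)).map (fun p => (p, d + 1))) res hsub hq1 :=
      pvLoopA_congr hq hq1 (by simp) rfl
    _ = pvLoopA allowed track ((([] : List (Int × Int)) ++ (pvKeep d res pend).flatMap (pvNbrsT track)).map (fun p => (p, d + 1)))
          (res ++ (pvKeep d res pend).map (fun p => (p.1, p.2, d))) hsub hq2 :=
      pvALevel allowed track hsub d pend [] res hpend (by simp) hq1 hq2
    _ = pvLoopA allowed track [] res hsub hq3 :=
      pvLoopA_congr hq2 hq3 (by rw [hK]; simp) (by rw [hK]; simp)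
    _ = res := pvLoopA_nil allowed track res hsub hq3
    _ = pvLoopB allowed track [] res d hsub hBnil := (pvLoopB_nil allowed track res d hsub hBnil).symm
    _ = pvLoopB allowed track (pvKeep d res pend) res d hsub hB :=
      pvLoopB_congr hBnil hB hK.symm rfl

theorem pvMain (allowed track : List (Int × Int)) (hsub : ∀ x ∈ track, x ∈ allowed) :
    ∀ (N : Nat) (pend : List (Int × Int)) (res : List (Int × Int × Int)) (d : Int)
      (hpend : ∀ p ∈ pend, p ∈ allowed)
      (hq : ∀ e ∈ pend.map (fun p => (p, d)), e.1 ∈ allowed)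
      (hB : (pvKeep d res pend).Nodup ∧ ∀ p ∈ pvKeep d res pend, p ∈ allowed ∧ pvHasKey res p = false),
      pvMeasure allowed res ≤ N →
      pvLoopA allowed track (pend.map (fun p => (p, d))) res hsub hq
        = pvLoopB allowed track (pvKeep d res pend) res d hsub hB := by
  intro N
  induction N with
  | zero =>
    intro pend res d hpend hq hB hle
    have hK : pvKeep d res pend = [] := by
      by_cases hKc : pvKeep d res pend = []
      · exact hKc
      · exfalso
        obtain ⟨k0, ks, hKe⟩ := List.exists_cons_of_ne_nil hKc
        have hk0 := hB.2 k0 (by rw [hKe]; exact List.mem_cons_self)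
        have hpos : 0 < pvMeasure allowed res :=
          Finset.card_pos.2 ⟨k0, Finset.mem_filter.2 ⟨List.mem_toFinset.2 hk0.1, hk0.2⟩⟩
        omega
    exact pvEmptyKeep allowed track hsub pend res d hpend hq hB hK
  | succ n ih =>
    intro pend res d hpend hq hB hle
    by_cases hKc : pvKeep d res pend = []
    · exact pvEmptyKeep allowed track hsub pend res d hpend hq hB hKc
    · obtain ⟨k0, ks, hKe⟩ := List.exists_cons_of_ne_nil hKc
      have hKne : pvKeep d res pend ≠ [] := hKc
      have hflat : ∀ x ∈ (pvKeep d res pend).flatMap (pvNbrsT track), x ∈ allowed :=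
        pvFlatSub hsub _
      have hq1 : ∀ e ∈ pend.map (fun p => (p, d)) ++ ([] : List (Int × Int)).map (fun p => (p, d + 1)), e.1 ∈ allowed := by
        simpa using hq
      have hq2 : ∀ e ∈ (([] : List (Int × Int)) ++ (pvKeep d res pend).flatMap (pvNbrsT track)).map (fun p => (p, d + 1)), e.1 ∈ allowed :=
        pvQokMap (fun x hx => hflat x (by simpa using hx)) (d + 1)
      have hq3 : ∀ e ∈ ((pvKeep d res pend).flatMap (pvNbrsT track)).map (fun p => (p, d + 1)), e.1 ∈ allowed :=
        pvQokMap hflat (d + 1)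
      have hB2 : (pvKeep (d + 1) (res ++ (pvKeep d res pend).map (fun p => (p.1, p.2, d))) ((pvKeep d res pend).flatMap (pvNbrsT track))).Nodup ∧
          ∀ p ∈ pvKeep (d + 1) (res ++ (pvKeep d res pend).map (fun p => (p.1, p.2, d))) ((pvKeep d res pend).flatMap (pvNbrsT track)),
            p ∈ allowed ∧ pvHasKey (res ++ (pvKeep d res pend).map (fun p => (p.1, p.2, d))) p = false := by
        obtain ⟨h1, h2⟩ := pvKeep_props (d + 1) ((pvKeep d res pend).flatMap (pvNbrsT track))
          (res ++ (pvKeep d res pend).map (fun p => (p.1, p.2, d)))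
        exact ⟨h1, fun x hx => ⟨hflat x (h2 x hx).1, (h2 x hx).2⟩⟩
      have hmlt : pvMeasure allowed (res ++ (pvKeep d res pend).map (fun p => (p.1, p.2, d))) < pvMeasure allowed res := by
        have hk0 := hB.2 k0 (by rw [hKe]; exact List.mem_cons_self)
        rw [hKe, List.map_cons, List.append_cons]
        exact lt_of_le_of_lt (pvMeasure_append_le allowed _ _)
          (pvMeasure_lt allowed res k0 d hk0.1 hk0.2)
      -- the invariant for the literal fold arguments of pvLoopB_ne
      have hfold1 : (pvKeep d res pend).foldl (fun r p => r ++ [(p.1, p.2, d)]) res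
          = res ++ (pvKeep d res pend).map (fun p => (p.1, p.2, d)) :=
        PySem.List.foldl_append_singleton_eq_map (fun (p : Int × Int) => (p.1, p.2, d)) _ _
      have hfB' : (pvNextFrontier track (pvRecordLevel d res (pvKeep d res pend)) (pvKeep d res pend)).Nodup ∧
          ∀ p ∈ pvNextFrontier track (pvRecordLevel d res (pvKeep d res pend)) (pvKeep d res pend),
            p ∈ allowed ∧ pvHasKey (pvRecordLevel d res (pvKeep d res pend)) p = false := by
        obtain ⟨g1, g2⟩ := pvOuterInv track (pvRecordLevel d res (pvKeep d res pend))
          (pvKeep d res pend) [] List.nodup_nil (by simp)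
        exact ⟨g1, fun x hx => ⟨hsub x (g2 x hx).1, (g2 x hx).2⟩⟩
      have hBstep : pvLoopB allowed track (pvKeep d res pend) res d hsub hB
          = pvLoopB allowed track
              (pvKeep (d + 1) (res ++ (pvKeep d res pend).map (fun p => (p.1, p.2, d))) ((pvKeep d res pend).flatMap (pvNbrsT track)))
              (res ++ (pvKeep d res pend).map (fun p => (p.1, p.2, d))) (d + 1) hsub hB2 := by
        rw [pvLoopB_ne allowed track (pvKeep d res pend) res d hsub hB hKne hfB']
        have hrec : pvRecordLevel d res (pvKeep d res pend)
            = res ++ (pvKeep d res pend).map (fun p => (p.1, p.2, d)) := by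
          unfold pvRecordLevel
          exact hfold1
        apply pvLoopB_congr
        · unfold pvNextFrontier
          rw [pvFoldOuter track _ (d + 1) (pvKeep d res pend) []]
          simp only [List.map_nil, List.append_nil, List.nil_append]
          rw [hrec]
        · exact hrec
      calc
        pvLoopA allowed track (pend.map (fun p => (p, d))) res hsub hq
            = pvLoopA allowed track (pend.map (fun p => (p, d)) ++ ([] : List (Int × Int)).map (fun p => (p, d + 1))) res hsub hq1 :=
          pvLoopA_congr hq hq1 (by simp) rfl
        _ = pvLoopA allowed track ((([] : List (Int × Int)) ++ (pvKeep d res pend).flatMap (pvNbrsT track)).map (fun p => (p, d + 1)))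
              (res ++ (pvKeep d res pend).map (fun p => (p.1, p.2, d))) hsub hq2 :=
          pvALevel allowed track hsub d pend [] res hpend (by simp) hq1 hq2
        _ = pvLoopA allowed track (((pvKeep d res pend).flatMap (pvNbrsT track)).map (fun p => (p, d + 1)))
              (res ++ (pvKeep d res pend).map (fun p => (p.1, p.2, d))) hsub hq3 :=
          pvLoopA_congr hq2 hq3 (by simp) rfl
        _ = pvLoopB allowed track
              (pvKeep (d + 1) (res ++ (pvKeep d res pend).map (fun p => (p.1, p.2, d))) ((pvKeep d res pend).flatMap (pvNbrsT track)))
              (res ++ (pvKeep d res pend).map (fun p => (p.1, p.2, d))) (d + 1) hsub hB2 :=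
          ih ((pvKeep d res pend).flatMap (pvNbrsT track))
            (res ++ (pvKeep d res pend).map (fun p => (p.1, p.2, d))) (d + 1) hflat hq3 hB2 (by omega)
        _ = pvLoopB allowed track (pvKeep d res pend) res d hsub hB := hBstep.symm

-- ===== VERDICT (by name: the statement is the Claim_ definition above) =====
theorem build_dist_map_spec : Claim_equal_build_dist_map := by
  intro ref track _
  unfold Spec_build_dist_map build_dist_map build_dist_map_alt
  have hsub : ∀ x ∈ track, x ∈ ref :: track := fun x hx => List.mem_cons_of_mem _ hx
  have hpend : ∀ p ∈ [ref], p ∈ ref :: track := by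
    intro p hp; rw [List.mem_singleton] at hp; subst hp; exact List.mem_cons_self
  have hq : ∀ e ∈ ([ref].map (fun p => (p, (0 : Int)))), e.1 ∈ ref :: track := pvQokMap hpend 0
  have hKinit : pvKeep 0 ([] : List (Int × Int × Int)) [ref] = [ref] := by
    simp [pvKeep, pvHasKey]
  have hB : (pvKeep 0 ([] : List (Int × Int × Int)) [ref]).Nodup ∧
      ∀ p ∈ pvKeep 0 ([] : List (Int × Int × Int)) [ref], p ∈ ref :: track ∧ pvHasKey [] p = false := by
    constructor
    · rw [hKinit]; exact List.nodup_singleton _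
    · intro p hp
      rw [hKinit, List.mem_singleton] at hp
      subst hp
      exact ⟨List.mem_cons_self, rfl⟩
  have hBalt : ([ref] : List (Int × Int)).Nodup ∧
      ∀ p ∈ ([ref] : List (Int × Int)), p ∈ ref :: track ∧ pvHasKey [] p = false := by
    constructor
    · exact List.nodup_singleton _
    · intro p hp
      rw [List.mem_singleton] at hp
      subst hp
      exact ⟨List.mem_cons_self, rfl⟩
  calc
    pvLoopA (ref :: track) track [(ref, 0)] []
        (fun x hx => List.mem_cons_of_mem _ hx)
        (by intro e he; rw [List.mem_singleton] at he; subst he; exact List.mem_cons_self)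
        = pvLoopA (ref :: track) track ([ref].map (fun p => (p, (0 : Int)))) [] hsub hq :=
      pvLoopA_congr _ hq (by simp) rfl
    _ = pvLoopB (ref :: track) track (pvKeep 0 ([] : List (Int × Int × Int)) [ref]) [] 0 hsub hB :=
      pvMain (ref :: track) track hsub (pvMeasure (ref :: track) []) [ref] [] 0 hpend hq hB le_rfl
    _ = pvLoopB (ref :: track) track [ref] [] 0
        (fun x hx => List.mem_cons_of_mem _ hx)
        (by
          refine ⟨List.nodup_singleton _, ?_⟩
          intro p hp; rw [List.mem_singleton] at hp; subst hp
          exact ⟨List.mem_cons_self, rfl⟩) :=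
      pvLoopB_congr hB hBalt hKinit rfl
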